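-- pv_equiv track=rewrite | github.com/aeriheo/Problem-Solving | 211223/BOJ_1978.py | func
-- ===== SOURCE A (Python) =====
-- def func(num):
--     result = False
--     if num == 1:
--         return True
--     for i in range(2, num):
--         if num%i==0:
--             result = True
--     return result
-- ===== SOURCE B (Python) =====
-- def func(num):
--     if num == 1:
--         return True
--     if num < 4:
--         return False
--     if num % 2 == 0:
--         return True
--     i = 3
--     while i * i <= num:
--         if num % i == 0:
--             return True
--         i += 2
--     return False
-- ===== Notes on version B (the rewrite author's own statement) =====
-- stated objective: faster
-- what changed: Replaces A's exhaustive scan of every candidate divisor 2..num-1 with an even-divisor check followed by a while loop of odd-only trial division bounded by i*i <= num with early return.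
import Mathlib
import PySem

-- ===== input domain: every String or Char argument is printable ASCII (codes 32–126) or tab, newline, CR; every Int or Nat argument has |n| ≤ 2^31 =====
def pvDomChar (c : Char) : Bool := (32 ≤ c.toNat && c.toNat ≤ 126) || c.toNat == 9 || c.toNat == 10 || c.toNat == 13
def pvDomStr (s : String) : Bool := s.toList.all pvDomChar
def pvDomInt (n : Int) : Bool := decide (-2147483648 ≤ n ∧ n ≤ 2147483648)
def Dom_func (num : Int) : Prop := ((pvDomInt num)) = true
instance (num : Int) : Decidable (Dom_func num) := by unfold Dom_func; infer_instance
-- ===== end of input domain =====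

-- B replaces A's exhaustive scan of divisors 2..num-1 with an even check plus an
-- odd-only while loop bounded by i*i <= num: objective 'faster' (O(√n) vs O(n) candidates).

-- ===== PORT A =====
def func (num : Int) : Bool :=
  if num == 1 then true
  else
    (PySem.List.pyRange 2 num 1).foldl
      (fun result i => if PySem.Int.mod num i == 0 then true else result) false

-- ===== PORT B =====
-- the while loop of Source B; inside it num ≥ 4 and i ≥ 3, so Python's % on these
-- positive ints coincides with Nat %, and the loop is exact over Nat
def altLoop (n : Nat) (i : Nat) : Bool :=
  if _h : i * i ≤ n then
    if n % i == 0 then true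
    else altLoop n (i + 2)
  else false
termination_by n + 1 - i
decreasing_by
  rcases Nat.eq_zero_or_pos i with rfl | hi
  · omega
  · have hii : i ≤ i * i := Nat.le_mul_of_pos_left i hi
    omega

def func_alt (num : Int) : Bool :=
  if num == 1 then true
  else if num < 4 then false
  else if PySem.Int.mod num 2 == 0 then true
  else altLoop num.toNat 3

-- ===== PRECONDITION & SPEC =====
def Spec_func (num : Int) (out : Bool) : Prop := out = func_alt num
instance (num : Int) (out : Bool) : Decidable (Spec_func num out) := by unfold Spec_func; infer_instance

-- ===== CLAIM (what is proved, stated in full; the proofs are below) =====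
def Claim_equal_func : Prop := ∀ (num : Int), Dom_func num → Spec_func num (func num)

-- ===== LEMMAS AND PROOFS =====

-- A's accumulator loop (no early exit) computes an 'any'
theorem foldl_ite_true_eq_any (p : Int → Bool) (l : List Int) (b : Bool) :
    l.foldl (fun result i => if p i then true else result) b = (b || l.any p) := by
  induction l generalizing b with
  | nil => simp
  | cons x xs ih =>
      simp only [List.foldl_cons, List.any_cons, ih]
      by_cases h : p x = true <;> simp [h]

-- characterisation of the odd-step while loop
theorem altLoop_eq_true_iff (n : Nat) (i : Nat) :
    altLoop n i = true ↔ ∃ j, i ≤ j ∧ (j - i) % 2 = 0 ∧ j * j ≤ n ∧ j ∣ n := by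
  induction i using altLoop.induct n with
  | case1 i h hmod =>
      rw [altLoop, dif_pos h, if_pos hmod]
      simp only [true_iff]
      exact ⟨i, le_refl i, by omega, h, Nat.dvd_of_mod_eq_zero (by simpa using hmod)⟩
  | case2 i h hmod ih =>
      rw [altLoop, dif_pos h, if_neg hmod]
      rw [ih]
      constructor
      · rintro ⟨j, hij, hpar, hsq, hdvd⟩
        exact ⟨j, by omega, by omega, hsq, hdvd⟩
      · rintro ⟨j, hij, hpar, hsq, hdvd⟩
        refine ⟨j, ?_, by omega, hsq, hdvd⟩
        rcases Nat.eq_or_lt_of_le hij with rfl | hlt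
        · exact absurd (Nat.mod_eq_zero_of_dvd hdvd) (by simpa using hmod)
        · omega
  | case3 i h =>
      rw [altLoop, dif_neg h]
      simp only [Bool.false_eq_true, false_iff]
      rintro ⟨j, hij, _, hsq, _⟩
      have : i * i ≤ j * j := Nat.mul_le_mul hij hij
      omega

-- a proper divisor exists iff a prime with square ≤ n divides n
theorem exists_proper_divisor_iff (n : Nat) (h2 : 2 ≤ n) :
    (∃ i, 2 ≤ i ∧ i < n ∧ i ∣ n) ↔ ∃ p, Nat.Prime p ∧ p ∣ n ∧ p * p ≤ n := by
  constructor
  · rintro ⟨i, hi2, hin, hdvd⟩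
    have hnp : ¬ n.Prime := by
      intro hp
      rcases Nat.Prime.eq_one_or_self_of_dvd hp i hdvd with h | h <;> omega
    refine ⟨n.minFac, Nat.minFac_prime (by omega), Nat.minFac_dvd n, ?_⟩
    have := Nat.minFac_sq_le_self (by omega) hnp
    nlinarith [this]
  · rintro ⟨p, hp, hdvd, hsq⟩
    refine ⟨p, hp.two_le, ?_, hdvd⟩
    nlinarith [hp.two_le]

-- bridge: divisibility over the Int range of A vs over Nat
theorem int_divisor_iff_nat (n : Nat) (num : Int) (hnum : num = (n : Int)) :
    (∃ i : Int, 2 ≤ i ∧ i < num ∧ i ∣ num) ↔ (∃ i : Nat, 2 ≤ i ∧ i < n ∧ i ∣ n) := by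
  subst hnum
  constructor
  · rintro ⟨i, hi2, hib, hdvd⟩
    refine ⟨i.toNat, by omega, by omega, ?_⟩
    have h : (i.toNat : Int) ∣ (n : Int) := by rwa [Int.toNat_of_nonneg (by omega)]
    exact_mod_cast h
  · rintro ⟨i, hi2, hib, hdvd⟩
    exact ⟨(i : Int), by exact_mod_cast hi2, by exact_mod_cast hib, by exact_mod_cast hdvd⟩

-- ===== VERDICT (by name: the statement is the Claim_ definition above) =====
theorem func_spec : Claim_equal_func := by
  intro num _
  unfold Spec_func func func_alt
  by_cases h1 : num = 1
  · simp [h1]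
  · rw [if_neg (by simp [h1] : ¬ ((num == 1) = true)),
       if_neg (by simp [h1] : ¬ ((num == 1) = true)),
       foldl_ite_true_eq_any]
    simp only [Bool.false_or]
    by_cases h4 : num < 4
    · rw [if_pos h4]
      by_cases h2 : num < 2
      · rw [PySem.List.pyRange_one_eq_nil (by omega)]; simp
      · interval_cases num <;> decide
    · rw [if_neg h4]
      set n : Nat := num.toNat with hn
      have hnum : num = (n : Int) := by omega
      have h2 : 2 ≤ n := by omega
      have hA : ((PySem.List.pyRange 2 num 1).any fun i => PySem.Int.mod num i == 0) = true
          ↔ ∃ i : Int, 2 ≤ i ∧ i < num ∧ i ∣ num := by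
        simp only [List.any_eq_true, PySem.List.mem_pyRange_one, beq_iff_eq,
          PySem.Int.mod_eq_zero_iff_dvd]
        tauto
      by_cases heven : PySem.Int.mod num 2 == 0
      · rw [if_pos heven]
        rw [Bool.eq_iff_iff, hA]
        simp only [iff_true]
        refine ⟨2, by norm_num, by omega, ?_⟩
        rw [← PySem.Int.mod_eq_zero_iff_dvd]
        simpa using heven
      · rw [if_neg heven]
        have hodd : ¬ (2 ∣ n) := by
          intro hd
          have h2d : (2 : Int) ∣ num := by rw [hnum]; exact_mod_cast hd
          exact heven (by simpa using h2d)
        rw [Bool.eq_iff_iff, hA, int_divisor_iff_nat n num hnum,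
            exists_proper_divisor_iff n h2, altLoop_eq_true_iff]
        constructor
        · rintro ⟨p, hp, hdvd, hsq⟩
          have hp2 : 2 ≤ p := hp.two_le
          have hpne2 : p ≠ 2 := by rintro rfl; exact hodd hdvd
          have hpodd : p % 2 = 1 := Nat.odd_iff.mp (hp.odd_of_ne_two hpne2)
          exact ⟨p, by omega, by omega, hsq, hdvd⟩
        · rintro ⟨j, hj3, hpar, hsq, hdvd⟩
          refine ⟨j.minFac, Nat.minFac_prime (by omega), (Nat.minFac_dvd j).trans hdvd, ?_⟩
          have h1 : j.minFac ≤ j := Nat.minFac_le (by omega)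
          nlinarith [h1]
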